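-- pv_equiv track=rewrite | github.com/srinivaspaluvayi/EventAIde | src/travel_planner/providers/geoapify_dining_provider.py | _cuisine_from_categories
-- ===== SOURCE A (Python) =====
-- def _cuisine_from_categories(categories: object) -> str:
--     if not isinstance(categories, list):
--         return "Local cuisine"
--     for cat in categories:
--         if not isinstance(cat, str):
--             continue
--         if cat.startswith("catering.restaurant.") and len(cat) > len("catering.restaurant."):
--             return cat.replace("catering.restaurant.", "").replace("_", " ").title()
--         if cat.startswith("catering.cafe"):
--             return "Cafe"
--         if cat.startswith("catering.bar"):
--             return "Bar"
--     for cat in categories: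
--         if isinstance(cat, str) and cat.startswith("catering."):
--             return cat.replace("catering.", "").replace("_", " ").title()
--     return "Local cuisine"
-- ===== SOURCE B (Python) =====
-- def _classify(cat: object) -> tuple:
--     """Rank a single category: 0 = priority match, 1 = generic catering, 2 = irrelevant."""
--     if not isinstance(cat, str):
--         return (2, "")
--     if cat.startswith("catering.restaurant.") and len(cat) > len("catering.restaurant."):
--         return (0, cat.replace("catering.restaurant.", "").replace("_", " ").title())
--     if cat.startswith("catering.cafe"):
--         return (0, "Cafe")
--     if cat.startswith("catering.bar"):
--         return (0, "Bar")
--     if cat.startswith("catering."):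
--         return (1, cat.replace("catering.", "").replace("_", " ").title())
--     return (2, "")
--
--
-- def _cuisine_from_categories(categories: object) -> str:
--     if not isinstance(categories, list):
--         return "Local cuisine"
--     rank, _i, label = min(
--         ((r, i, lab) for i, (r, lab) in enumerate(map(_classify, categories))),
--         default=(2, 0, ""),
--     )
--     return label if rank < 2 else "Local cuisine"
-- ===== Notes on version B (the rewrite author's own statement) =====
-- stated objective: alternative
-- what changed: Replaces A's two sequential passes (priority pass, then generic-fallback pass) with a rank-and-select algorithm: every category is classified once into a (rank, label) pair (0 = priority match, 1 = generic catering, 2 = irrelevant) and the minimum of the enumerated (rank, index, label) triples selects the answer.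
import Mathlib
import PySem

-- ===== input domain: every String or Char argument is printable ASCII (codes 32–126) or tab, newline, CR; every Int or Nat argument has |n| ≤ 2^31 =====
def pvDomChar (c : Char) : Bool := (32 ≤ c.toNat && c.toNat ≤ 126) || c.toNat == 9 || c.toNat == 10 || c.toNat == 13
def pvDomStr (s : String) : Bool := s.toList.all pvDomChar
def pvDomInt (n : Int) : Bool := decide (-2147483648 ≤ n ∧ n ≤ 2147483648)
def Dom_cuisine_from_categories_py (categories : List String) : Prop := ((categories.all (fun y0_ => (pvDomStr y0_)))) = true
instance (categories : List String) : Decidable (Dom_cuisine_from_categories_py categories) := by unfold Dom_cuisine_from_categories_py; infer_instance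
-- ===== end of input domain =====

-- B replaces A's two sequential passes (priority pass, then generic-fallback pass) with a
-- rank-and-select algorithm: each category is mapped to a (rank, label) pair and the
-- minimum-ranked, earliest entry wins (objective: alternative decomposition).

-- ===== PORT A =====
-- transliteration of Python's str.title() (exact on the ASCII domain:
-- a char is uppercased iff the previous char is not a letter, lowercased otherwise)
def pvUpA (c : Char) : Char := if 'a' ≤ c ∧ c ≤ 'z' then Char.ofNat (c.toNat - 32) else c
def pvLowA (c : Char) : Char := if 'A' ≤ c ∧ c ≤ 'Z' then Char.ofNat (c.toNat + 32) else c
def pvIsAlphaA (c : Char) : Bool := ('a' ≤ c ∧ c ≤ 'z') ∨ ('A' ≤ c ∧ c ≤ 'Z')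
def pvTitleChars : List Char → Bool → List Char
  | [], _ => []
  | c :: rest, prev =>
      (if pvIsAlphaA c then (if prev then pvLowA c else pvUpA c) else c)
        :: pvTitleChars rest (pvIsAlphaA c)
def pvTitle (s : String) : String := String.ofList (pvTitleChars s.toList false)

-- cat.replace("catering.restaurant.", "").replace("_", " ").title()
def pvCleanRestaurant (cat : String) : String :=
  pvTitle (PySem.Str.replace (PySem.Str.replace cat "catering.restaurant." "") "_" " ")
-- cat.replace("catering.", "").replace("_", " ").title()
def pvCleanGeneric (cat : String) : String :=
  pvTitle (PySem.Str.replace (PySem.Str.replace cat "catering." "") "_" " ")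

-- first loop of A: returns the priority result, if any
def pvFirstPass : List String → Option String
  | [] => none
  | cat :: rest =>
      if PySem.Str.startswith cat "catering.restaurant." = true ∧
         PySem.Str.len "catering.restaurant." < PySem.Str.len cat then
        some (pvCleanRestaurant cat)
      else if PySem.Str.startswith cat "catering.cafe" = true then some "Cafe"
      else if PySem.Str.startswith cat "catering.bar" = true then some "Bar"
      else pvFirstPass rest
-- second loop of A: first generic 'catering.' category
def pvSecondPass : List String → Option String
  | [] => none
  | cat :: rest =>
      if PySem.Str.startswith cat "catering." = true then some cat else pvSecondPass rest

def cuisine_from_categories_py (categories : List String) : String :=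
  match pvFirstPass categories with
  | some r => r
  | none =>
    match pvSecondPass categories with
    | some c => pvCleanGeneric c
    | none => "Local cuisine"

-- ===== PORT B =====
-- B's str.title(): zip each char with whether its predecessor is a letter, map case-flip
def pvIsAlphaB (c : Char) : Bool := c.isLower || c.isUpper
def pvUpB (c : Char) : Char := if c.isLower then Char.ofNat (c.toNat - 32) else c
def pvLowB (c : Char) : Char := if c.isUpper then Char.ofNat (c.toNat + 32) else c
def pvTitleB (s : String) : String :=
  String.ofList ((s.toList.zip (false :: s.toList.map pvIsAlphaB)).map
    (fun p => if p.2 then pvLowB p.1 else pvUpB p.1))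

-- _classify: rank a single category (0 = priority, 1 = generic catering, 2 = irrelevant)
def pvClassifyB (cat : String) : Nat × String :=
  if PySem.Str.startswith cat "catering.restaurant." = true ∧
     PySem.Str.len "catering.restaurant." < PySem.Str.len cat then
    (0, pvTitleB (PySem.Str.replace (PySem.Str.replace cat "catering.restaurant." "") "_" " "))
  else if PySem.Str.startswith cat "catering.cafe" = true then (0, "Cafe")
  else if PySem.Str.startswith cat "catering.bar" = true then (0, "Bar")
  else if PySem.Str.startswith cat "catering." = true then
    (1, pvTitleB (PySem.Str.replace (PySem.Str.replace cat "catering." "") "_" " "))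
  else (2, "")

-- Python's min over the enumerated (rank, index, label) triples, lexicographic; the
-- (rank, index) pairs are pairwise distinct, so the label never decides (as in Python)
def pvMinRanked : List (Int × (Nat × String)) → Option (Nat × Int × String)
  | [] => none
  | (i, (r, lab)) :: rest =>
      match pvMinRanked rest with
      | none => some (r, i, lab)
      | some b => some (if b.1 < r ∨ (b.1 = r ∧ b.2.1 < i) then b else (r, i, lab))

def cuisine_from_categories_py_alt (categories : List String) : String :=
  match pvMinRanked (PySem.List.enumerate (categories.map pvClassifyB)) with
  | some best => if best.1 < 2 then best.2.2 else "Local cuisine"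
  | none => "Local cuisine"

-- ===== PRECONDITION & SPEC =====
def Spec_cuisine_from_categories_py (categories : List String) (out : String) : Prop := out = cuisine_from_categories_py_alt categories
instance (categories : List String) (out : String) : Decidable (Spec_cuisine_from_categories_py categories out) := by unfold Spec_cuisine_from_categories_py; infer_instance

-- ===== CLAIM =====
def Claim_equal_cuisine_from_categories_py : Prop := ∀ (categories : List String), Dom_cuisine_from_categories_py categories → Spec_cuisine_from_categories_py categories (cuisine_from_categories_py categories)

-- ===== LEMMAS AND PROOFS =====
theorem pvLower_iff (c : Char) : c.isLower = decide ('a' ≤ c ∧ c ≤ 'z') := by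
  rw [Bool.eq_iff_iff]
  simp [Char.isLower, Char.le_def]

theorem pvUpper_iff (c : Char) : c.isUpper = decide ('A' ≤ c ∧ c ≤ 'Z') := by
  rw [Bool.eq_iff_iff]
  simp [Char.isUpper, Char.le_def]

theorem pvIsAlphaB_eq (c : Char) : pvIsAlphaB c = pvIsAlphaA c := by
  simp [pvIsAlphaB, pvIsAlphaA, pvLower_iff, pvUpper_iff]

theorem pvLowB_eq (c : Char) : pvLowB c = pvLowA c := by
  simp [pvLowB, pvLowA, pvUpper_iff]

theorem pvUpB_eq (c : Char) : pvUpB c = pvUpA c := by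
  simp [pvUpB, pvUpA, pvLower_iff]

theorem pvLowA_id (c : Char) (h : pvIsAlphaA c = false) : pvLowA c = c := by
  simp [pvIsAlphaA] at h
  simp only [pvLowA]
  rw [if_neg]
  rintro ⟨h1, h2⟩
  exact absurd h2 (not_le.2 (h.2 h1))

theorem pvUpA_id (c : Char) (h : pvIsAlphaA c = false) : pvUpA c = c := by
  simp [pvIsAlphaA] at h
  simp only [pvUpA]
  rw [if_neg]
  rintro ⟨h1, h2⟩
  exact absurd h2 (not_le.2 (h.1 h1))

theorem titleB_eq_titleChars (l : List Char) (prev : Bool) :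
    (List.zipWith Prod.mk l (prev :: l.map pvIsAlphaB)).map
        (fun p => if p.2 then pvLowB p.1 else pvUpB p.1)
      = pvTitleChars l prev := by
  induction l generalizing prev with
  | nil => rfl
  | cons c rest ih =>
    simp only [List.map, List.zipWith, pvTitleChars]
    rw [ih (pvIsAlphaB c), pvIsAlphaB_eq]
    congr 1
    by_cases h : pvIsAlphaA c = true
    · simp [h, pvLowB_eq, pvUpB_eq]
    · simp only [Bool.not_eq_true] at h
      simp [h, pvLowB_eq, pvUpB_eq, pvLowA_id c h, pvUpA_id c h]

theorem pvTitleB_eq (s : String) : pvTitleB s = pvTitle s := by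
  unfold pvTitleB pvTitle
  rw [List.zip, titleB_eq_titleChars]

-- every index produced by pvMinRanked on an enumeration from i is ≥ i
theorem pvMinRanked_idx_ge (l : List (Nat × String)) (i : Int) (b : Nat × Int × String)
    (h : pvMinRanked (PySem.List.enumerate l i) = some b) : i ≤ b.2.1 := by
  induction l generalizing i b with
  | nil => simp [PySem.List.enumerate, pvMinRanked] at h
  | cons x rest ih =>
    obtain ⟨r, lab⟩ := x
    rw [PySem.List.enumerate_cons] at h
    simp only [pvMinRanked] at h
    cases hE : pvMinRanked (PySem.List.enumerate rest (i + 1)) with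
    | none =>
      rw [hE] at h
      simp only [Option.some.injEq] at h
      rw [← h]
    | some b' =>
      have hb' := ih (i + 1) b' hE
      rw [hE] at h
      simp only [Option.some.injEq] at h
      split_ifs at h with hc
      · subst h; omega
      · subst h; simp

-- characterisation of B's min against A's two passes
theorem pvMinRanked_char (cats : List String) (i : Int) :
    (match pvFirstPass cats, pvSecondPass cats with
     | some r, _ => ∃ j, i ≤ j ∧
         pvMinRanked (PySem.List.enumerate (cats.map pvClassifyB) i) = some (0, j, r)
     | none, some c => ∃ j, i ≤ j ∧
         pvMinRanked (PySem.List.enumerate (cats.map pvClassifyB) i) = some (1, j, pvCleanGeneric c)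
     | none, none =>
         pvMinRanked (PySem.List.enumerate (cats.map pvClassifyB) i) = none ∨
         ∃ j s, i ≤ j ∧
           pvMinRanked (PySem.List.enumerate (cats.map pvClassifyB) i) = some (2, j, s)) := by
  induction cats generalizing i with
  | nil => simp [pvFirstPass, pvSecondPass, pvMinRanked]
  | cons cat rest ih =>
    have hidx := pvMinRanked_idx_ge (rest.map pvClassifyB) (i + 1)
    simp only [List.map, PySem.List.enumerate_cons, pvMinRanked, pvFirstPass, pvSecondPass]
    by_cases h1 : PySem.Str.startswith cat "catering.restaurant." = true ∧
        PySem.Str.len "catering.restaurant." < PySem.Str.len cat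
    · -- priority: restaurant with suffix
      simp only [pvClassifyB, if_pos h1]
      cases hE : pvMinRanked (PySem.List.enumerate (rest.map pvClassifyB) (i + 1)) with
      | none =>
        refine ⟨i, le_refl i, ?_⟩
        simp [pvCleanRestaurant, pvTitleB_eq]
      | some b =>
        have := hidx b hE
        have hc : ¬(b.2.1 < i) := by omega
        refine ⟨i, le_refl i, ?_⟩
        simp [hc, pvCleanRestaurant, pvTitleB_eq]
    · by_cases h2 : PySem.Str.startswith cat "catering.cafe" = true
      · simp only [pvClassifyB, if_neg h1, if_pos h2]
        cases hE : pvMinRanked (PySem.List.enumerate (rest.map pvClassifyB) (i + 1)) with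
        | none => exact ⟨i, le_refl i, rfl⟩
        | some b =>
          have := hidx b hE
          have hc : ¬(b.2.1 < i) := by omega
          exact ⟨i, le_refl i, by simp [hc]⟩
      · by_cases h3 : PySem.Str.startswith cat "catering.bar" = true
        · simp only [pvClassifyB, if_neg h1, if_neg h2, if_pos h3]
          cases hE : pvMinRanked (PySem.List.enumerate (rest.map pvClassifyB) (i + 1)) with
          | none => exact ⟨i, le_refl i, rfl⟩
          | some b =>
            have := hidx b hE
            have hc : ¬(b.2.1 < i) := by omega
            exact ⟨i, le_refl i, by simp [hc]⟩
        · by_cases h4 : PySem.Str.startswith cat "catering." = true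
          · -- generic catering category
            simp only [pvClassifyB, if_neg h1, if_neg h2, if_neg h3, if_pos h4]
            have ihr := ih (i + 1)
            cases hF : pvFirstPass rest with
            | some r =>
              rw [hF] at ihr
              obtain ⟨j, hj, hE⟩ := ihr
              exact ⟨j, by omega, by simp [hE]⟩
            | none =>
              rw [hF] at ihr
              cases hS : pvSecondPass rest with
              | some c =>
                rw [hS] at ihr
                obtain ⟨j, hj, hE⟩ := ihr
                have hc : ¬(j < i) := by omega
                exact ⟨i, le_refl i, by simp [hE, hc, pvCleanGeneric, pvTitleB_eq]⟩
              | none =>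
                rw [hS] at ihr
                rcases ihr with hE | ⟨j, s, hj, hE⟩
                · exact ⟨i, le_refl i, by simp [hE, pvCleanGeneric, pvTitleB_eq]⟩
                · have hc : ¬(j < i) := by omega
                  exact ⟨i, le_refl i, by simp [hE, hc, pvCleanGeneric, pvTitleB_eq]⟩
          · -- irrelevant category, rank 2
            simp only [pvClassifyB, if_neg h1, if_neg h2, if_neg h3, if_neg h4]
            have ihr := ih (i + 1)
            cases hF : pvFirstPass rest with
            | some r =>
              rw [hF] at ihr
              obtain ⟨j, hj, hE⟩ := ihr
              exact ⟨j, by omega, by simp [hE]⟩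
            | none =>
              rw [hF] at ihr
              cases hS : pvSecondPass rest with
              | some c =>
                rw [hS] at ihr
                obtain ⟨j, hj, hE⟩ := ihr
                exact ⟨j, by omega, by simp [hE]⟩
              | none =>
                rw [hS] at ihr
                rcases ihr with hE | ⟨j, s, hj, hE⟩
                · exact Or.inr ⟨i, "", le_refl i, by simp [hE]⟩
                · have hc : ¬(j < i) := by omega
                  exact Or.inr ⟨i, "", le_refl i, by simp [hE, hc]⟩

-- ===== VERDICT =====
theorem cuisine_from_categories_py_spec : Claim_equal_cuisine_from_categories_py := by
  intro categories _
  unfold Spec_cuisine_from_categories_py cuisine_from_categories_py cuisine_from_categories_py_alt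
  have h := pvMinRanked_char categories 0
  cases hF : pvFirstPass categories with
  | some r =>
    rw [hF] at h
    obtain ⟨j, _, hE⟩ := h
    simp [hE]
  | none =>
    rw [hF] at h
    cases hS : pvSecondPass categories with
    | some c =>
      rw [hS] at h
      obtain ⟨j, _, hE⟩ := h
      simp [hE]
    | none =>
      rw [hS] at h
      rcases h with hE | ⟨j, s, _, hE⟩
      · simp [hE]
      · simp [hE]
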